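-- pv_equiv track=rewrite | github.com/Protonk/sandbox-boostrap | book/api/profile/sbpl_scan/parser.py | _tokenize_sbpl
-- ===== SOURCE A (Python) =====
-- from typing import List, Optional, Sequence, Tuple
--
-- def _tokenize_sbpl(text: str) -> List[str]:
--     """Tokenize SBPL text into `(`, `)`, string literals, and atoms."""
--     tokens: List[str] = []
--     i = 0
--     n = len(text)
--
--     while i < n:
--         ch = text[i]
--
--         # whitespace
--         if ch.isspace():
--             i += 1
--             continue
--
--         # line comment
--         if ch == ";":
--             while i < n and text[i] != "\n":
--                 i += 1
--             continue
--
--         # block comment (#| ... |#)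
--         if text.startswith("#|", i):
--             end = text.find("|#", i + 2)
--             if end == -1:
--                 # Unterminated block comment: treat remainder as comment.
--                 break
--             i = end + 2
--             continue
--
--         if ch == "(" or ch == ")":
--             tokens.append(ch)
--             i += 1
--             continue
--
--         # string literal
--         if ch == '"':
--             start = i
--             i += 1
--             while i < n:
--                 if text[i] == "\\":
--                     i += 2
--                     continue
--                 if text[i] == '"':
--                     i += 1
--                     break
--                 i += 1
--             # Keep the quotes in the token so consumers can treat it as a
--             # literal without additional context.
--             tokens.append(text[start:i])
--             continue
--
--         # atom
--         start = i
--         while i < n: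
--             ch2 = text[i]
--             if ch2.isspace() or ch2 in ("(", ")", ";"):
--                 break
--             if text.startswith("#|", i):
--                 break
--             i += 1
--         if start == i:
--             # Defensive: avoid infinite loops on unexpected chars.
--             i += 1
--             continue
--         tokens.append(text[start:i])
--
--     return tokens
-- ===== SOURCE B (Python) =====
-- from typing import List
--
-- def _tokenize_sbpl(text: str) -> List[str]:
--     """Single-pass DFA lexer: one state per lexical mode, one transition per char."""
--     N, LC, BC, BCP, S, E, AT, H = range(8)  # normal, line-comment, block, block-pipe, string, escape, atom, pending-'#'
--     tokens: List[str] = []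
--     buf = ""
--     st = N
--     for ch in text:
--         if st == N:
--             if ch.isspace():
--                 pass
--             elif ch == ";":
--                 st = LC
--             elif ch == "#":
--                 st, buf = H, ""
--             elif ch in "()":
--                 tokens.append(ch)
--             elif ch == '"':
--                 st, buf = S, ch
--             else:
--                 st, buf = AT, ch
--         elif st == LC:
--             if ch == "\n":
--                 st = N
--         elif st == BC:
--             if ch == "|":
--                 st = BCP
--         elif st == BCP:
--             if ch == "#":
--                 st = N
--             elif ch != "|":
--                 st = BC
--         elif st == S:
--             buf += ch
--             if ch == "\\":
--                 st = E
--             elif ch == '"':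
--                 tokens.append(buf)
--                 st, buf = N, ""
--         elif st == E:
--             buf += ch
--             st = S
--         else:
--             if st == H:
--                 if ch == "|":
--                     if buf:
--                         tokens.append(buf)
--                     st, buf = BC, ""
--                     continue
--                 buf += "#"
--                 st = AT
--             # st == AT (possibly just entered from H)
--             if ch.isspace():
--                 tokens.append(buf)
--                 st, buf = N, ""
--             elif ch == ";":
--                 tokens.append(buf)
--                 st, buf = LC, ""
--             elif ch in "()":
--                 tokens.append(buf)
--                 tokens.append(ch)
--                 st, buf = N, ""
--             elif ch == "#":
--                 st = H
--             else:
--                 buf += ch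
--     if st in (AT, S, E):
--         tokens.append(buf)
--     elif st == H:
--         tokens.append(buf + "#")
--     return tokens
-- ===== Notes on version B (the rewrite author's own statement) =====
-- stated objective: alternative
-- what changed: A's index-jumping scanner with a separate inner while-loop per token kind (line comment, block comment, string, atom) is replaced by a single-pass DFA lexer: one explicit state per lexical mode and exactly one transition per character, with a final flush at end of input.
import Mathlib
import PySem

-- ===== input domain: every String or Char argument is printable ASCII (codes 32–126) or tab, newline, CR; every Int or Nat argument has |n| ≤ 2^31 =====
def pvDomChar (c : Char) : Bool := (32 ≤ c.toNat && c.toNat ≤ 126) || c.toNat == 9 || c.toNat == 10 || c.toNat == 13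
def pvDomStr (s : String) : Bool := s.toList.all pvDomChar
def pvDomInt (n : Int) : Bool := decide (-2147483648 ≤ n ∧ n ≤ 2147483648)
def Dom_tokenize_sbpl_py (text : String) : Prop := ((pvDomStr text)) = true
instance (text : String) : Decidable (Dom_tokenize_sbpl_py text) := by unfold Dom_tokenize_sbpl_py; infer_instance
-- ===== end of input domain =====

-- B re-implements A's index-jumping scanner (inner scan loops per token kind) as a
-- single-pass DFA lexer: one state per lexical mode, one transition per character
-- (objective: alternative structure, same O(n) cost).

-- ch.isspace() on the ASCII range (exact for all characters admitted by Dom_tokenize_sbpl_py)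
def pvWS (c : Char) : Bool :=
  c == ' ' || c == '\t' || c == '\n' || c == '\r' || c == '\x0b' || c == '\x0c'

-- ===== PORT A =====
-- inner loop `while i < n and text[i] != "\n": i += 1`
def skipLineA (cs : List Char) (i : Nat) : Nat :=
  if h : i < cs.length then
    if cs[i] = '\n' then i else skipLineA cs (i + 1)
  else i
termination_by cs.length - i
decreasing_by all_goals omega

-- `text.find("|#", j)` (first index ≥ j where "|#" occurs; none = -1)
def findBH (cs : List Char) (i : Nat) : Option Nat :=
  if h : i < cs.length then
    if cs[i] = '|' ∧ cs[i + 1]? = some '#' then some i else findBH cs (i + 1)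
  else none
termination_by cs.length - i
decreasing_by all_goals omega

-- the string-literal inner loop (returns the index just past the literal)
def stringEndA (cs : List Char) (i : Nat) : Nat :=
  if h : i < cs.length then
    if cs[i] = '\\' then stringEndA cs (i + 2)
    else if cs[i] = '"' then i + 1
    else stringEndA cs (i + 1)
  else i
termination_by cs.length - i
decreasing_by all_goals omega

-- the atom inner loop (returns the index of the terminator)
def atomEndA (cs : List Char) (i : Nat) : Nat :=
  if h : i < cs.length then
    if pvWS cs[i] || cs[i] == '(' || cs[i] == ')' || cs[i] == ';' then i
    else if cs[i] = '#' ∧ cs[i + 1]? = some '|' then i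
    else atomEndA cs (i + 1)
  else i
termination_by cs.length - i
decreasing_by all_goals omega

-- the main `while i < n` loop; fuel only makes the recursion structural (i strictly
-- increases each iteration, so length+1 fuel is never exhausted)
def tokA (cs : List Char) : Nat → Nat → List String
  | 0, _ => []
  | fuel + 1, i =>
    if h : i < cs.length then
      if pvWS cs[i] then tokA cs fuel (i + 1)
      else if cs[i] = ';' then tokA cs fuel (skipLineA cs i)
      else if cs[i] = '#' ∧ cs[i + 1]? = some '|' then
        match findBH cs (i + 2) with
        | none => []          -- unterminated block comment: break
        | some e => tokA cs fuel (e + 2)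
      else if cs[i] = '(' ∨ cs[i] = ')' then
        String.ofList [cs[i]] :: tokA cs fuel (i + 1)
      else if cs[i] = '"' then
        String.ofList ((cs.drop i).take (stringEndA cs (i + 1) - i))
          :: tokA cs fuel (stringEndA cs (i + 1))
      else
        if atomEndA cs i = i then tokA cs fuel (i + 1)   -- defensive branch of A
        else String.ofList ((cs.drop i).take (atomEndA cs i - i))
          :: tokA cs fuel (atomEndA cs i)
    else []

def tokenize_sbpl_py (text : String) : List String :=
  tokA text.toList (text.toList.length + 1) 0

-- ===== PORT B =====
inductive LexSt where
  | nrm | lc | bc | bcp | str | esc | atm | hsh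
deriving DecidableEq, Repr

-- one DFA transition (state, current token buffer, emitted tokens) × char
def stB : LexSt × List Char × List String → Char → LexSt × List Char × List String
  | (.nrm, buf, toks), c =>
    if pvWS c then (.nrm, buf, toks)
    else if c = ';' then (.lc, buf, toks)
    else if c = '#' then (.hsh, [], toks)
    else if c = '(' ∨ c = ')' then (.nrm, buf, toks ++ [String.ofList [c]])
    else if c = '"' then (.str, [c], toks)
    else (.atm, [c], toks)
  | (.lc, buf, toks), c => if c = '\n' then (.nrm, buf, toks) else (.lc, buf, toks)
  | (.bc, buf, toks), c => if c = '|' then (.bcp, buf, toks) else (.bc, buf, toks)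
  | (.bcp, buf, toks), c =>
    if c = '#' then (.nrm, buf, toks)
    else if c = '|' then (.bcp, buf, toks)
    else (.bc, buf, toks)
  | (.str, buf, toks), c =>
    if c = '\\' then (.esc, buf ++ [c], toks)
    else if c = '"' then (.nrm, [], toks ++ [String.ofList (buf ++ [c])])
    else (.str, buf ++ [c], toks)
  | (.esc, buf, toks), c => (.str, buf ++ [c], toks)
  | (.atm, buf, toks), c =>
    if pvWS c then (.nrm, [], toks ++ [String.ofList buf])
    else if c = ';' then (.lc, [], toks ++ [String.ofList buf])
    else if c = '(' ∨ c = ')' then (.nrm, [], toks ++ [String.ofList buf, String.ofList [c]])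
    else if c = '#' then (.hsh, buf, toks)
    else (.atm, buf ++ [c], toks)
  | (.hsh, buf, toks), c =>
    if c = '|' then (.bc, [], if buf = [] then toks else toks ++ [String.ofList buf])
    else  -- the pending '#' joins the atom buffer and c is handled as an atom char
      if pvWS c then (.nrm, [], toks ++ [String.ofList (buf ++ ['#'])])
      else if c = ';' then (.lc, [], toks ++ [String.ofList (buf ++ ['#'])])
      else if c = '(' ∨ c = ')' then (.nrm, [], toks ++ [String.ofList (buf ++ ['#']), String.ofList [c]])
      else if c = '#' then (.hsh, buf ++ ['#'], toks)
      else (.atm, buf ++ ['#', c], toks)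

-- flush the final state at end of input
def finishB : LexSt × List Char × List String → List String
  | (.atm, buf, toks) => toks ++ [String.ofList buf]
  | (.hsh, buf, toks) => toks ++ [String.ofList (buf ++ ['#'])]
  | (.str, buf, toks) => toks ++ [String.ofList buf]
  | (.esc, buf, toks) => toks ++ [String.ofList buf]
  | (_, _, toks) => toks

def tokenize_sbpl_py_alt (text : String) : List String :=
  finishB (text.toList.foldl stB (LexSt.nrm, [], []))

-- ===== PRECONDITION & SPEC =====
def Spec_tokenize_sbpl_py (text : String) (out : List String) : Prop := out = tokenize_sbpl_py_alt text
instance (text : String) (out : List String) : Decidable (Spec_tokenize_sbpl_py text out) := by unfold Spec_tokenize_sbpl_py; infer_instance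

-- ===== CLAIM (what is proved, stated in full; the proofs are below) =====
def Claim_equal_tokenize_sbpl_py : Prop := ∀ (text : String), Dom_tokenize_sbpl_py text → Spec_tokenize_sbpl_py text (tokenize_sbpl_py text)

-- ===== LEMMAS AND PROOFS =====

theorem skipLineA_ge (cs : List Char) (i : Nat) : i ≤ skipLineA cs i := by
  fun_induction skipLineA <;> omega


theorem skipLineA_stop (cs : List Char) (i : Nat) :
    cs.length ≤ skipLineA cs i ∨ cs[skipLineA cs i]? = some '\n' := by
  fun_induction skipLineA with
  | case1 i h hnl => right; simp [List.getElem?_eq_getElem h, hnl]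
  | case2 i h hnl ih => exact ih
  | case3 i h => omega


theorem findBH_ge (cs : List Char) (i e : Nat) (h : findBH cs i = some e) : i ≤ e := by
  fun_induction findBH generalizing e with
  | case1 j hlt hc => simp_all
  | case2 j hlt hc ih => have := ih e h; omega
  | case3 j hlt => simp_all


theorem stringEndA_ge (cs : List Char) (i : Nat) : i ≤ stringEndA cs i := by
  fun_induction stringEndA <;> omega


theorem atomEndA_ge (cs : List Char) (i : Nat) : i ≤ atomEndA cs i := by
  fun_induction atomEndA <;> omega


theorem tokA_nil (cs : List Char) (f i : Nat) (h : cs.length ≤ i) : tokA cs f i = [] := by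
  cases f with
  | zero => rfl
  | succ f => simp only [tokA]; rw [dif_neg (by omega)]


-- a bcp state behaves like bc on every char except '#'
theorem bcpStep (buf : List Char) (toks : List String) (c : Char) (h : c ≠ '#') :
    stB (.bcp, buf, toks) c = stB (.bc, buf, toks) c := by
  simp [stB, h]


-- a pending-'#' state behaves like the atom state with the '#' appended, except on '|'
theorem hshStep (buf : List Char) (toks : List String) (c : Char) (h : c ≠ '|') :
    stB (.hsh, buf, toks) c = stB (.atm, buf ++ ['#'], toks) c := by
  simp only [stB, if_neg h]; split_ifs <;> simp


-- the line-comment state consumes exactly what A's inner skip loop skips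
theorem lcL (cs : List Char) (i : Nat) (buf : List Char) (toks : List String) :
    List.foldl stB (.lc, buf, toks) (cs.drop i) =
      List.foldl stB (.lc, buf, toks) (cs.drop (skipLineA cs i)) := by
  fun_induction skipLineA cs i with
  | case1 i h hnl => rfl
  | case2 i h hnl ih =>
    rw [List.drop_eq_getElem_cons h, List.foldl_cons]
    have : stB (.lc, buf, toks) cs[i] = (.lc, buf, toks) := by simp [stB, hnl]
    rw [this]; exact ih
  | case3 i h => rfl


-- the block-comment states track A's find("|#")
theorem bcL (cs : List Char) (i : Nat) (toks : List String) :
    (findBH cs i = none → finishB (List.foldl stB (.bc, [], toks) (cs.drop i)) = toks) ∧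
    (∀ e, findBH cs i = some e →
      List.foldl stB (.bc, [], toks) (cs.drop i) =
        List.foldl stB (.nrm, [], toks) (cs.drop (e + 2))) := by
  fun_induction findBH cs i with
  | case1 j hlt hc =>
    obtain ⟨hbar, hhash⟩ := hc
    obtain ⟨hlt2, hh⟩ := List.getElem?_eq_some_iff.1 hhash
    constructor
    · intro hn; simp at hn
    · intro e he
      injection he with he; subst he
      rw [List.drop_eq_getElem_cons hlt, List.foldl_cons,
          List.drop_eq_getElem_cons hlt2, List.foldl_cons]
      simp [stB, hbar, hh]
  | case2 j hlt hc ih =>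
    by_cases hbar : cs[j] = '|'
    · -- '|' but next is not '#'
      have hnh : cs[j + 1]? ≠ some '#' := fun hh => hc ⟨hbar, hh⟩
      rw [List.drop_eq_getElem_cons hlt, List.foldl_cons]
      have hstep : stB (.bc, [], toks) cs[j] = (.bcp, [], toks) := by simp [stB, hbar]
      rw [hstep]
      by_cases hlt2 : j + 1 < cs.length
      · have hc2 : cs[j + 1] ≠ '#' := by
          intro hh; exact hnh (by simp [List.getElem?_eq_getElem hlt2, hh])
        rw [List.drop_eq_getElem_cons hlt2, List.foldl_cons, bcpStep _ _ _ hc2,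
            ← List.foldl_cons, ← List.drop_eq_getElem_cons hlt2]
        exact ih
      · have hnil : cs.drop (j + 1) = [] := List.drop_eq_nil_of_le (by omega)
        have hfn : findBH cs (j + 1) = none := by
          unfold findBH; rw [dif_neg (by omega)]
        constructor
        · intro _; rw [hnil]; rfl
        · intro e he; rw [hfn] at he; exact absurd he (by simp)
    · rw [List.drop_eq_getElem_cons hlt, List.foldl_cons]
      have hstep : stB (.bc, [], toks) cs[j] = (.bc, [], toks) := by simp [stB, hbar]
      rw [hstep]
      exact ih
  | case3 j hlt =>
    have hnil : cs.drop j = [] := List.drop_eq_nil_of_le (by omega)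
    constructor
    · intro _; rw [hnil]; rfl
    · intro e he; simp at he


-- split the first character off a token slice
theorem takeSplit (cs : List Char) (i j : Nat) (h : i < cs.length) (hj : i + 1 ≤ j) :
    (cs.drop i).take (j - i) = cs[i] :: ((cs.drop (i + 1)).take (j - (i + 1))) := by
  rw [List.drop_eq_getElem_cons h]
  have hs : j - i = (j - (i + 1)) + 1 := by omega
  rw [hs, List.take_succ_cons]

-- the string states consume exactly A's string inner loop and emit the same literal
theorem strL (cs : List Char) (i : Nat) (buf : List Char) (toks : List String) :
    finishB (List.foldl stB (.str, buf, toks) (cs.drop i)) =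
      finishB (List.foldl stB
        (.nrm, [], toks ++ [String.ofList (buf ++ (cs.drop i).take (stringEndA cs i - i))])
        (cs.drop (stringEndA cs i))) := by
  fun_induction stringEndA cs i generalizing buf toks with
  | case1 i hlt hc ih =>
    have hj : i + 2 ≤ stringEndA cs (i + 2) := stringEndA_ge cs (i + 2)
    conv_lhs => rw [List.drop_eq_getElem_cons hlt, List.foldl_cons]
    have hstep : stB (.str, buf, toks) cs[i] = (.esc, buf ++ [cs[i]], toks) := by
      simp [stB, hc]
    rw [hstep]
    by_cases h2 : i + 1 < cs.length
    · conv_lhs => rw [List.drop_eq_getElem_cons h2, List.foldl_cons]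
      have hstep2 : stB (.esc, buf ++ [cs[i]], toks) cs[i + 1]
          = (.str, buf ++ [cs[i]] ++ [cs[i + 1]], toks) := by simp [stB]
      rw [hstep2, ih, takeSplit cs i _ hlt (by omega), takeSplit cs (i + 1) _ h2 (by omega),
        show i + 1 + 1 = i + 2 from rfl]
      have hl : buf ++ [cs[i]] ++ [cs[i + 1]]
            ++ ((cs.drop (i + 2)).take (stringEndA cs (i + 2) - (i + 2)))
          = buf ++ (cs[i] :: cs[i + 1]
            :: ((cs.drop (i + 2)).take (stringEndA cs (i + 2) - (i + 2)))) := by simp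
      rw [hl]
    · have hnil : cs.drop (i + 1) = [] := List.drop_eq_nil_of_le (by omega)
      have hj2 : stringEndA cs (i + 2) = i + 2 := by
        unfold stringEndA; rw [dif_neg (by omega)]
      rw [hnil, hj2, takeSplit cs i _ hlt (by omega), hnil,
        List.drop_eq_nil_of_le (show cs.length ≤ i + 2 by omega)]
      have ht : (([] : List Char).take (i + 2 - (i + 1))) = [] := by simp
      rw [ht]
      simp [finishB]
  | case2 i hlt hc hq =>
    conv_lhs => rw [List.drop_eq_getElem_cons hlt, List.foldl_cons]
    have hstep : stB (.str, buf, toks) cs[i]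
        = (.nrm, [], toks ++ [String.ofList (buf ++ [cs[i]])]) := by
      simp [stB, hq]
    rw [hstep, takeSplit cs i (i + 1) hlt (by omega),
      show i + 1 - (i + 1) = 0 from by omega, List.take_zero]
  | case3 i hlt hc hq ih =>
    conv_lhs => rw [List.drop_eq_getElem_cons hlt, List.foldl_cons]
    have hstep : stB (.str, buf, toks) cs[i] = (.str, buf ++ [cs[i]], toks) := by
      simp [stB, hc, hq]
    rw [hstep, ih, takeSplit cs i _ hlt (le_trans (by omega) (stringEndA_ge cs (i + 1)))]
    have hl : buf ++ [cs[i]]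
          ++ ((cs.drop (i + 1)).take (stringEndA cs (i + 1) - (i + 1)))
        = buf ++ (cs[i] :: ((cs.drop (i + 1)).take (stringEndA cs (i + 1) - (i + 1)))) := by
      simp
    rw [hl]
  | case4 i hlt =>
    have hnil : cs.drop i = [] := List.drop_eq_nil_of_le (by omega)
    rw [hnil]
    simp [finishB]


-- the atom/pending-'#' states consume exactly A's atom inner loop and emit the same atom
theorem atmL (cs : List Char) (i : Nat) (buf : List Char) (toks : List String) (hb : buf ≠ []) :
    finishB (List.foldl stB (.atm, buf, toks) (cs.drop i)) =
      finishB (List.foldl stB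
        (.nrm, [], toks ++ [String.ofList (buf ++ (cs.drop i).take (atomEndA cs i - i))])
        (cs.drop (atomEndA cs i))) := by
  fun_induction atomEndA cs i generalizing buf toks hb with
  | case1 i hlt hterm =>
    rw [show i - i = 0 from by omega, List.take_zero, List.append_nil,
      List.drop_eq_getElem_cons hlt, List.foldl_cons, List.foldl_cons]
    have hstep : stB (.atm, buf, toks) cs[i]
        = stB (.nrm, [], toks ++ [String.ofList buf]) cs[i] := by
      simp only [Bool.or_eq_true, beq_iff_eq] at hterm
      rcases hterm with ((hw | hp) | hp) | hp
      · simp [stB, hw]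
      · rw [hp]; simp [stB, pvWS]
      · rw [hp]; simp [stB, pvWS]
      · rw [hp]; simp [stB, pvWS]
    rw [hstep]
  | case2 i hlt hterm1 hterm2 =>
    obtain ⟨hch, hnx⟩ := hterm2
    obtain ⟨h2, hc2⟩ := List.getElem?_eq_some_iff.1 hnx
    simp only [Bool.or_eq_true, beq_iff_eq, not_or] at hterm1
    obtain ⟨⟨⟨hw, hp1⟩, hp2⟩, hp3⟩ := hterm1
    rw [show i - i = 0 from by omega, List.take_zero, List.append_nil,
      List.drop_eq_getElem_cons hlt, List.foldl_cons, List.foldl_cons,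
      List.drop_eq_getElem_cons h2, List.foldl_cons, List.foldl_cons]
    have hstep : stB (.atm, buf, toks) cs[i] = (.hsh, buf, toks) := by
      rw [hch]; simp [stB, pvWS]
    have hstep2 : stB (.nrm, [], toks ++ [String.ofList buf]) cs[i]
        = (.hsh, [], toks ++ [String.ofList buf]) := by
      rw [hch]; simp [stB, pvWS]
    rw [hstep, hstep2, hc2]
    have hbar : stB (.hsh, buf, toks) '|'
        = (.bc, [], toks ++ [String.ofList buf]) := by
      simp [stB, hb]
    have hbar2 : stB (.hsh, [], toks ++ [String.ofList buf]) '|'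
        = (.bc, [], toks ++ [String.ofList buf]) := by
      simp [stB]
    rw [hbar, hbar2]
  | case3 i hlt hterm1 hterm2 ih =>
    have hj : i + 1 ≤ atomEndA cs (i + 1) := atomEndA_ge cs (i + 1)
    simp only [Bool.or_eq_true, beq_iff_eq, not_or] at hterm1
    obtain ⟨⟨⟨hw, hp1⟩, hp2⟩, hp3⟩ := hterm1
    by_cases hch : cs[i] = '#'
    · have hnx : cs[i + 1]? ≠ some '|' := fun hh => hterm2 ⟨hch, hh⟩
      conv_lhs => rw [List.drop_eq_getElem_cons hlt, List.foldl_cons]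
      have hstep : stB (.atm, buf, toks) cs[i] = (.hsh, buf, toks) := by
        rw [hch]; simp [stB, pvWS]
      rw [hstep]
      by_cases h2 : i + 1 < cs.length
      · have hc2 : cs[i + 1] ≠ '|' := by
          intro hh; exact hnx (by simp [List.getElem?_eq_getElem h2, hh])
        conv_lhs => rw [List.drop_eq_getElem_cons h2, List.foldl_cons]
        rw [hshStep buf toks cs[i + 1] hc2]
        conv_lhs => rw [← List.foldl_cons, ← List.drop_eq_getElem_cons h2]
        rw [ih (buf ++ ['#']) toks (by simp),
          takeSplit cs i _ hlt (by omega)]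
        have hl : buf ++ ['#']
              ++ ((cs.drop (i + 1)).take (atomEndA cs (i + 1) - (i + 1)))
            = buf ++ (cs[i] :: ((cs.drop (i + 1)).take (atomEndA cs (i + 1) - (i + 1)))) := by
          simp [hch]
        rw [hl]
      · have hnil : cs.drop (i + 1) = [] := List.drop_eq_nil_of_le (by omega)
        have hj2 : atomEndA cs (i + 1) = i + 1 := by
          unfold atomEndA; rw [dif_neg (by omega)]
        rw [hnil, hj2, takeSplit cs i _ hlt (by omega),
          show i + 1 - (i + 1) = 0 from by omega, List.take_zero, hnil, hch]
        simp [finishB]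
    · conv_lhs => rw [List.drop_eq_getElem_cons hlt, List.foldl_cons]
      have hstep : stB (.atm, buf, toks) cs[i] = (.atm, buf ++ [cs[i]], toks) := by
        simp [stB, hw, hp1, hp2, hp3, hch]
      rw [hstep, ih (buf ++ [cs[i]]) toks (by simp),
        takeSplit cs i _ hlt (by omega)]
      have hl : buf ++ [cs[i]]
            ++ ((cs.drop (i + 1)).take (atomEndA cs (i + 1) - (i + 1)))
          = buf ++ (cs[i] :: ((cs.drop (i + 1)).take (atomEndA cs (i + 1) - (i + 1)))) := by
        simp
      rw [hl]
  | case4 i hlt =>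
    have hnil : cs.drop i = [] := List.drop_eq_nil_of_le (by omega)
    rw [hnil]
    simp [finishB]


-- main loop invariant: from a token boundary, the DFA run equals A's remaining tokens
theorem mainL (cs : List Char) (fuel : Nat) :
    ∀ i toks, cs.length ≤ i + fuel →
      finishB (List.foldl stB (.nrm, [], toks) (cs.drop i)) = toks ++ tokA cs fuel i := by
  induction fuel using Nat.strong_induction_on with
  | _ fuel IH =>
  intro i toks hle
  cases fuel with
  | zero =>
    rw [List.drop_eq_nil_of_le (by omega)]
    simp [tokA, finishB]
  | succ f =>
    by_cases h : i < cs.length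
    case neg =>
      rw [List.drop_eq_nil_of_le (by omega)]
      simp only [tokA]
      rw [dif_neg h]
      simp [finishB]
    case pos =>
    simp only [tokA]
    rw [dif_pos h]
    by_cases hws : pvWS cs[i] = true
    · rw [if_pos hws]
      conv_lhs => rw [List.drop_eq_getElem_cons h, List.foldl_cons]
      rw [show stB (.nrm, [], toks) cs[i] = (.nrm, [], toks) from by simp [stB, hws]]
      exact IH f (by omega) (i + 1) toks (by omega)
    rw [if_neg hws]
    by_cases hsemi : cs[i] = ';'
    · rw [if_pos hsemi]
      conv_lhs => rw [List.drop_eq_getElem_cons h, List.foldl_cons]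
      rw [show stB (.nrm, [], toks) cs[i] = (.lc, [], toks) from by
        rw [hsemi]; simp [stB, pvWS]]
      have hsk : skipLineA cs i = skipLineA cs (i + 1) := by
        conv_lhs => rw [skipLineA]
        rw [dif_pos h, if_neg (by rw [hsemi]; decide)]
      rw [lcL cs (i + 1), ← hsk]
      have hij : i + 1 ≤ skipLineA cs i := hsk ▸ skipLineA_ge cs (i + 1)
      rcases skipLineA_stop cs i with hstop | hstop
      · rw [List.drop_eq_nil_of_le hstop, tokA_nil cs f _ hstop]
        simp [finishB]
      · obtain ⟨hjlt, hjc⟩ := List.getElem?_eq_some_iff.1 hstop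
        obtain ⟨f', rfl⟩ : ∃ f', f = f' + 1 := ⟨f - 1, by omega⟩
        conv_lhs => rw [List.drop_eq_getElem_cons hjlt, List.foldl_cons]
        rw [show stB (.lc, [], toks) cs[skipLineA cs i] = (.nrm, [], toks) from by
          rw [hjc]; simp [stB]]
        have hstep : tokA cs (f' + 1) (skipLineA cs i) = tokA cs f' (skipLineA cs i + 1) := by
          simp only [tokA]; rw [dif_pos hjlt, if_pos (by rw [hjc]; rfl)]
        rw [hstep]
        exact IH f' (by omega) (skipLineA cs i + 1) toks (by omega)
    rw [if_neg hsemi]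
    by_cases hbc : cs[i] = '#' ∧ cs[i + 1]? = some '|'
    · rw [if_pos hbc]
      obtain ⟨hch, hnx⟩ := hbc
      obtain ⟨h2, hc2⟩ := List.getElem?_eq_some_iff.1 hnx
      conv_lhs => rw [List.drop_eq_getElem_cons h, List.foldl_cons]
      rw [show stB (.nrm, [], toks) cs[i] = (.hsh, [], toks) from by
        rw [hch]; simp [stB, pvWS]]
      conv_lhs => rw [List.drop_eq_getElem_cons h2, List.foldl_cons]
      rw [show stB (.hsh, [], toks) cs[i + 1] = (.bc, [], toks) from by
        rw [hc2]; simp [stB]]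
      cases hfind : findBH cs (i + 2) with
      | none =>
        rw [(bcL cs (i + 2) toks).1 hfind]
        simp
      | some e =>
        rw [(bcL cs (i + 2) toks).2 e hfind]
        exact IH f (by omega) (e + 2) toks
          (by have := findBH_ge cs (i + 2) e hfind; omega)
    rw [if_neg hbc]
    by_cases hpar : cs[i] = '(' ∨ cs[i] = ')'
    · rw [if_pos hpar]
      have hch : cs[i] ≠ '#' := by rcases hpar with hp | hp <;> rw [hp] <;> decide
      conv_lhs => rw [List.drop_eq_getElem_cons h, List.foldl_cons]
      rw [show stB (.nrm, [], toks) cs[i] = (.nrm, [], toks ++ [String.ofList [cs[i]]]) from by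
        simp [stB, hws, hsemi, hch, hpar]]
      rw [IH f (by omega) (i + 1) (toks ++ [String.ofList [cs[i]]]) (by omega)]
      simp
    rw [if_neg hpar]
    obtain ⟨hp1, hp2⟩ := not_or.1 hpar
    by_cases hq : cs[i] = '"'
    · rw [if_pos hq]
      have hse : i + 1 ≤ stringEndA cs (i + 1) := stringEndA_ge cs (i + 1)
      conv_lhs => rw [List.drop_eq_getElem_cons h, List.foldl_cons]
      rw [show stB (.nrm, [], toks) cs[i] = (.str, [cs[i]], toks) from by
        rw [hq]; simp [stB, pvWS]]
      rw [strL cs (i + 1) [cs[i]] toks,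
        IH f (by omega) (stringEndA cs (i + 1)) _ (by omega),
        takeSplit cs i _ h (by omega)]
      simp
    rw [if_neg hq]
    have hja : i + 1 ≤ atomEndA cs (i + 1) := atomEndA_ge cs (i + 1)
    have hAE : atomEndA cs i = atomEndA cs (i + 1) := by
      have hb1 : (pvWS cs[i] || cs[i] == '(' || cs[i] == ')' || cs[i] == ';') = false := by
        simp only [Bool.or_eq_false_iff, beq_eq_false_iff_ne]
        exact ⟨⟨⟨by simpa using hws, hp1⟩, hp2⟩, hsemi⟩
      conv_lhs => rw [atomEndA]
      rw [dif_pos h, if_neg (by rw [hb1]; simp), if_neg hbc]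
    rw [if_neg (by omega : ¬atomEndA cs i = i)]
    by_cases hch : cs[i] = '#'
    · have hnx : cs[i + 1]? ≠ some '|' := fun hh => hbc ⟨hch, hh⟩
      conv_lhs => rw [List.drop_eq_getElem_cons h, List.foldl_cons]
      rw [show stB (.nrm, [], toks) cs[i] = (.hsh, [], toks) from by
        rw [hch]; simp [stB, pvWS]]
      by_cases h2 : i + 1 < cs.length
      · have hc2 : cs[i + 1] ≠ '|' := by
          intro hh; exact hnx (by simp [List.getElem?_eq_getElem h2, hh])
        conv_lhs => rw [List.drop_eq_getElem_cons h2, List.foldl_cons]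
        rw [hshStep [] toks cs[i + 1] hc2]
        conv_lhs => rw [← List.foldl_cons, ← List.drop_eq_getElem_cons h2]
        rw [show ([] : List Char) ++ ['#'] = ['#'] from rfl,
          atmL cs (i + 1) ['#'] toks (by simp),
          IH f (by omega) (atomEndA cs (i + 1)) _ (by omega),
          hAE, takeSplit cs i _ h (by omega), hch]
        simp
      · have hnil : cs.drop (i + 1) = [] := List.drop_eq_nil_of_le (by omega)
        have hj2 : atomEndA cs (i + 1) = i + 1 := by
          conv_lhs => rw [atomEndA]
          rw [dif_neg (by omega)]
        rw [hnil, hAE, hj2, takeSplit cs i _ h (by omega),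
          show i + 1 - (i + 1) = 0 from by omega, List.take_zero,
          tokA_nil cs f (i + 1) (by omega), hch]
        simp [finishB]
    · conv_lhs => rw [List.drop_eq_getElem_cons h, List.foldl_cons]
      rw [show stB (.nrm, [], toks) cs[i] = (.atm, [cs[i]], toks) from by
        simp [stB, hws, hsemi, hp1, hp2, hch, hq]]
      rw [atmL cs (i + 1) [cs[i]] toks (by simp),
        IH f (by omega) (atomEndA cs (i + 1)) _ (by omega),
        hAE, takeSplit cs i _ h (by omega)]
      simp


-- ===== VERDICT (by name: the statement is the Claim_ definition above) =====
theorem tokenize_sbpl_py_spec : Claim_equal_tokenize_sbpl_py := by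
  intro text _
  unfold Spec_tokenize_sbpl_py tokenize_sbpl_py tokenize_sbpl_py_alt
  have := mainL text.toList (text.toList.length + 1) 0 [] (by omega)
  simpa using this.symm
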